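-- pv_equiv track=rewrite | github.com/sysulic/MethodRefine | example/satellite/new_tihtn_planner.py | find_precondition
-- ===== SOURCE A (Python) =====
-- def find_precondition(orders, subTask_len):
--     keys = set()
--     for order in orders:
--         keys.add(order[1])
--     prekeys = list()
--     for i in range(0, subTask_len):
--         if i not in keys:
--             prekeys.append(i)
--     return prekeys
-- ===== SOURCE B (Python) =====
-- def find_precondition(orders, subTask_len):
--     targets = sorted({t for _, t in orders if 0 <= t < subTask_len})
--     prekeys = []
--     prev = 0
--     for t in targets:
--         prekeys.extend(range(prev, t))
--         prev = t + 1
--     prekeys.extend(range(prev, subTask_len))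
--     return prekeys
-- ===== Notes on version B (the rewrite author's own statement) =====
-- stated objective: alternative
-- what changed: Instead of testing each range index for membership in a target set, B sorts the distinct in-range targets and emits the gap ranges between consecutive targets directly, with no per-index membership test.
import Mathlib
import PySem

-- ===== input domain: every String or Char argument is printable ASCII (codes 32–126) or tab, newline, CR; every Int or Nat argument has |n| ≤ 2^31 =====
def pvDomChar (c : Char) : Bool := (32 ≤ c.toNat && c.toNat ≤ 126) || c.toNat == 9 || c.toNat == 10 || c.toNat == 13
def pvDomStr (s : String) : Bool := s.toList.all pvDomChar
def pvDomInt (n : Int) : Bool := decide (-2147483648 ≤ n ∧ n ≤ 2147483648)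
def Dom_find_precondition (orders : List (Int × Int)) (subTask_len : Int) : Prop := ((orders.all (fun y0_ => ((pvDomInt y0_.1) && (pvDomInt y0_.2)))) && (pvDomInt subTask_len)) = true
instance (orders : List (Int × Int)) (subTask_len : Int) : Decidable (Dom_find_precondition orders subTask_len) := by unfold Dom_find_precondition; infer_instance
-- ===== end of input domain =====

-- B replaces A's per-index membership scan of range(subTask_len) by sorting the distinct
-- in-range targets and emitting the gap ranges between consecutive targets; objective: alternative.

-- ===== PORT A =====
def find_precondition (orders : List (Int × Int)) (subTask_len : Int) : List Int :=
  let keys : PySem.Set Int :=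
    orders.foldl (fun s order => PySem.Set.add s order.2) PySem.Set.empty
  (PySem.List.pyRange 0 subTask_len 1).foldl
    (fun prekeys i => if PySem.Set.contains keys i then prekeys else prekeys ++ [i]) []

-- ===== PORT B =====
def find_precondition_alt (orders : List (Int × Int)) (subTask_len : Int) : List Int :=
  let targets : List Int :=
    PySem.List.sorted
      (PySem.Set.ofList ((orders.filter (fun o => decide (0 ≤ o.2) && decide (o.2 < subTask_len))).map (fun o => o.2)))
      (fun x => x) false
  let r := targets.foldl
    (fun (st : List Int × Int) t => (st.1 ++ PySem.List.pyRange st.2 t 1, t + 1)) ([], 0)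
  r.1 ++ PySem.List.pyRange r.2 subTask_len 1

-- ===== PRECONDITION & SPEC =====
def Spec_find_precondition (orders : List (Int × Int)) (subTask_len : Int) (out : List Int) : Prop := out = find_precondition_alt orders subTask_len
instance (orders : List (Int × Int)) (subTask_len : Int) (out : List Int) : Decidable (Spec_find_precondition orders subTask_len out) := by unfold Spec_find_precondition; infer_instance

-- ===== CLAIM (what is proved, stated in full; the proofs are below) =====
def Claim_equal_find_precondition : Prop := ∀ (orders : List (Int × Int)) (subTask_len : Int), Dom_find_precondition orders subTask_len → Spec_find_precondition orders subTask_len (find_precondition orders subTask_len)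

-- ===== LEMMAS AND PROOFS =====

-- A's loop over orders builds exactly set(map(snd, orders)).
theorem keys_eq_targets (orders : List (Int × Int)) :
    orders.foldl (fun s order => PySem.Set.add s order.2) PySem.Set.empty
      = PySem.Set.ofList (orders.map (fun order => order.2)) := by
  rw [← PySem.Set.update_map_eq_foldl_add]
  exact PySem.Set.update_nil_left _

-- A's range loop is a filter by non-membership ('if i not in keys: append').
theorem foldl_skip_if (p : Int → Bool) (l acc : List Int) :
    l.foldl (fun a x => if p x then a else a ++ [x]) acc
      = acc ++ l.filter (fun x => !p x) := by
  induction l generalizing acc with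
  | nil => simp
  | cons x xs ih => by_cases h : p x <;> simp [h, ih]

-- Gap emission over a strictly increasing list of targets in [lo, n) produces exactly
-- the range [lo, n) filtered by non-membership in the targets.
theorem gap_emit (ts : List Int) (lo n : Int) (acc : List Int)
    (hb : ∀ t ∈ ts, lo ≤ t ∧ t < n) (hp : ts.Pairwise (· < ·)) :
    (let r := ts.foldl
        (fun (st : List Int × Int) t => (st.1 ++ PySem.List.pyRange st.2 t 1, t + 1)) (acc, lo);
      r.1 ++ PySem.List.pyRange r.2 n 1)
      = acc ++ (PySem.List.pyRange lo n 1).filter (fun i => !decide (i ∈ ts)) := by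
  induction ts generalizing lo acc with
  | nil => simp
  | cons t rest ih =>
    obtain ⟨hlt, htn⟩ := hb t (List.mem_cons_self ..)
    have hrest : ∀ s ∈ rest, t + 1 ≤ s ∧ s < n := by
      intro s hs
      exact ⟨by have := (List.pairwise_cons.mp hp).1 s hs; omega, (hb s (List.mem_cons_of_mem _ hs)).2⟩
    have hsplit : PySem.List.pyRange lo n 1
        = PySem.List.pyRange lo t 1 ++ (t :: PySem.List.pyRange (t+1) n 1) := by
      rw [PySem.List.pyRange_one_append lo t n hlt (le_of_lt htn),
          PySem.List.pyRange_one_cons htn]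
    simp only [List.foldl_cons]
    rw [ih (t+1) (acc ++ PySem.List.pyRange lo t 1) hrest (List.pairwise_cons.mp hp).2, hsplit]
    rw [List.filter_append, List.filter_cons]
    have h1 : (PySem.List.pyRange lo t 1).filter (fun i => !decide (i ∈ t :: rest))
        = PySem.List.pyRange lo t 1 := by
      apply List.filter_eq_self.mpr
      intro i hi
      have hit : i < t := (PySem.List.mem_pyRange_one.mp hi).2
      have hni : i ∉ t :: rest := by
        simp only [List.mem_cons]
        rintro (rfl | hmem)
        · omega
        · have := (hrest i hmem).1; omega
      simp [hni]
    have h2 : (PySem.List.pyRange (t+1) n 1).filter (fun i => !decide (i ∈ t :: rest))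
        = (PySem.List.pyRange (t+1) n 1).filter (fun i => !decide (i ∈ rest)) := by
      apply List.filter_congr
      intro i hi
      have hit : t + 1 ≤ i := (PySem.List.mem_pyRange_one.mp hi).1
      simp only [List.mem_cons]
      have : ¬ i = t := by omega
      simp [this]
    rw [h1, h2]; simp [List.append_assoc]

-- ===== VERDICT (by name: the statement is the Claim_ definition above) =====
theorem find_precondition_spec : Claim_equal_find_precondition := by
  intro orders n _
  unfold Spec_find_precondition
  show find_precondition orders n = find_precondition_alt orders n
  simp only [find_precondition, find_precondition_alt]
  rw [keys_eq_targets, foldl_skip_if]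
  set ts := PySem.List.sorted
      (PySem.Set.ofList ((orders.filter (fun o => decide (0 ≤ o.2) && decide (o.2 < n))).map (fun o => o.2)))
      (fun x => x) false with hts
  have hb : ∀ t ∈ ts, 0 ≤ t ∧ t < n := by
    intro t ht
    rw [hts, PySem.List.mem_sorted, PySem.Set.mem_ofList, List.mem_map] at ht
    obtain ⟨o, ho, rfl⟩ := ht
    have := List.of_mem_filter ho
    simp only [Bool.and_eq_true, decide_eq_true_eq] at this
    exact this
  have hp : ts.Pairwise (· < ·) := PySem.List.sorted_ofList_pairwise_lt _
  rw [gap_emit ts 0 n [] hb hp]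
  simp only [List.nil_append]
  apply List.filter_congr
  intro i hi
  obtain ⟨h0, hn⟩ := PySem.List.mem_pyRange_one.mp hi
  congr 1
  rw [Bool.eq_iff_iff, PySem.Set.contains_iff, decide_eq_true_eq]
  rw [hts, PySem.List.mem_sorted, PySem.Set.mem_ofList, PySem.Set.mem_ofList, List.mem_map,
      List.mem_map]
  constructor
  · rintro ⟨o, ho, rfl⟩
    exact ⟨o, List.mem_filter.mpr ⟨ho, by simp [h0, hn]⟩, rfl⟩
  · rintro ⟨o, ho, rfl⟩
    exact ⟨o, List.mem_filter.mp ho |>.1, rfl⟩
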